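-- pv_equiv track=rewrite | github.com/lijucheng809/dynamic-pickup-and-delivery-solver | simulator/dpdp_competition/algorithm/src/request_cluster.py | ongoing_request_cluster
-- ===== SOURCE A (Python) =====
-- def ongoing_request_cluster(request_id_on_order: list, requests_items_map: dict, ongoing_items_map: dict,
--                             vehicle_id: str):
--     id = 1000
--     new_request_id_on_order = []
--     new_requests_items_map = {}
--     n = len(request_id_on_order)
--     left, rk = 0, 0
--
--     while left < n:
--         while rk + 1 < n and ongoing_items_map[requests_items_map[request_id_on_order[rk + 1]]["delivery_only"][0]][
--             "delivery_factory_id"] \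
--                 == ongoing_items_map[requests_items_map[request_id_on_order[left]]["delivery_only"][0]]["delivery_factory_id"]:
--             rk += 1
--         new_id = str(id) + vehicle_id
--         new_request_id_on_order.append(new_id)
--         new_requests_items_map[new_id] = {"delivery_only": []}
--         for i in range(left, rk+1):
--             for item_id in requests_items_map[request_id_on_order[i]]["delivery_only"]:
--                 new_requests_items_map[new_id]["delivery_only"].append(item_id)
--         id += 1
--         left = rk + 1
--         rk += 1
--     return new_request_id_on_order, new_requests_items_map
-- ===== SOURCE B (Python) =====
-- def ongoing_request_cluster(request_id_on_order: list, requests_items_map: dict, ongoing_items_map: dict,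
--                             vehicle_id: str):
--     # Single forward pass: group consecutive requests sharing a delivery factory,
--     # merging their delivery_only items, then emit ids/map for the groups.
--     runs = []          # one merged delivery_only list per consecutive-factory run
--     cur_fac = None
--     for rid in request_id_on_order:
--         items = requests_items_map[rid]["delivery_only"]
--         fac = ongoing_items_map[items[0]]["delivery_factory_id"]
--         if runs and fac == cur_fac:
--             runs[-1] = runs[-1] + items
--         else:
--             runs.append(list(items))
--             cur_fac = fac
--     new_request_id_on_order = []
--     new_requests_items_map = {}
--     nid = 1000
--     for run in runs:
--         key = str(nid) + vehicle_id
--         new_request_id_on_order.append(key)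
--         new_requests_items_map[key] = {"delivery_only": run}
--         nid += 1
--     return new_request_id_on_order, new_requests_items_map
-- ===== Notes on version B (the rewrite author's own statement) =====
-- stated objective: simpler
-- what changed: Replaced the nested two-pointer while/while run-finder with index bookkeeping (left/rk plus an inner range loop) by a single forward pass that tracks the current factory id and merges each request's delivery_only items into the last run, followed by a plain emit loop that numbers the runs from 1000; Pre_ excludes only inputs on which both programs raise (missing/empty lookups).
import Mathlib
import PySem

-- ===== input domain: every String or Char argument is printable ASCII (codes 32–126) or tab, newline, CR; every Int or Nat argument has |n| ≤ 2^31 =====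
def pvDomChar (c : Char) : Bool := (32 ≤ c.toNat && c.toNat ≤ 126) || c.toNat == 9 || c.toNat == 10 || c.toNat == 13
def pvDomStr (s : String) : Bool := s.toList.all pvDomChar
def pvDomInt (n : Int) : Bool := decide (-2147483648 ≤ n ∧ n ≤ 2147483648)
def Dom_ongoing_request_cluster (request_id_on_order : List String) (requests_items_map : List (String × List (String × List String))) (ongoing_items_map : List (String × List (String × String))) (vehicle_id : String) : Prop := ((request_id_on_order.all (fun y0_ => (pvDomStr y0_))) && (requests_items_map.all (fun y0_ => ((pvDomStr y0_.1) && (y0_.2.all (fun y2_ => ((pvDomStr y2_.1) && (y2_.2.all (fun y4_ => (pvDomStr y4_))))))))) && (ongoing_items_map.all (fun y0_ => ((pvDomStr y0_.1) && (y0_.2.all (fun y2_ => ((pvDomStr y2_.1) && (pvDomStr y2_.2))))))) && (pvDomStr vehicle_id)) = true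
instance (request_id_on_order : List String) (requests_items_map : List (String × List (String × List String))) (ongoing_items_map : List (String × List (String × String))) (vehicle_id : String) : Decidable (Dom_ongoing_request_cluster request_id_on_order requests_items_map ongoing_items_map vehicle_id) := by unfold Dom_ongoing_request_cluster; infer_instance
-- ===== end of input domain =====

-- B replaces A's nested two-pointer while/while run-finder by a single forward pass tracking the
-- current factory id plus a separate emit loop (objective: simpler); return values agree on Pre_.

-- ===== PORT A =====
-- total lookup helpers for the chained dict/list accesses (Pre_ guarantees every lookup succeeds;
-- the "" / [] defaults are never reached inside Pre_)
def pvDel (requests_items_map : List (String × List (String × List String))) (rid : String) : List String :=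
  (List.lookup "delivery_only" ((List.lookup rid requests_items_map).getD [])).getD []

def pvFac (requests_items_map : List (String × List (String × List String)))
    (ongoing_items_map : List (String × List (String × String))) (rid : String) : String :=
  (List.lookup "delivery_factory_id"
    ((List.lookup ((pvDel requests_items_map rid).headD "") ongoing_items_map).getD [])).getD ""

def pvGet (l : List String) (i : Nat) : String := l.getD i ""

-- inner while: extend rk while the next request's factory equals the factory at index `left`
def pvFindRk (f : String → String) (ids : List String) (n left rk : Nat) : Nat :=
  if h : rk + 1 < n ∧ f (pvGet ids (rk + 1)) = f (pvGet ids left) then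
    pvFindRk f ids n left (rk + 1)
  else rk
termination_by n - rk
decreasing_by omega

-- the 'for i in range(left, rk+1): for item_id in …: append' loops
def pvCollect (requests_items_map : List (String × List (String × List String)))
    (ids : List String) (left rk : Nat) : List String :=
  (PySem.List.pyRange (left : Int) ((rk : Int) + 1) 1).foldl
    (fun acc i => acc ++ pvDel requests_items_map (pvGet ids i.toNat)) []

-- outer while, fuel = n (each iteration advances left by at least 1)
def pvOuterA (f : String → String) (requests_items_map : List (String × List (String × List String)))
    (ids : List String) (n : Nat) (vehicle_id : String) :
    Nat → Int → Nat → Nat → List String × List (String × List (String × List String))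
  | 0, _, _, _ => ([], [])
  | fuel + 1, id, left, rk =>
    if left < n then
      let rk' := pvFindRk f ids n left rk
      let newId := PySem.Int.toStr id ++ vehicle_id
      let items := pvCollect requests_items_map ids left rk'
      let rest := pvOuterA f requests_items_map ids n vehicle_id fuel (id + 1) (rk' + 1) (rk' + 1)
      (newId :: rest.1, (newId, [("delivery_only", items)]) :: rest.2)
    else ([], [])

def ongoing_request_cluster (request_id_on_order : List String) (requests_items_map : List (String × List (String × List String))) (ongoing_items_map : List (String × List (String × String))) (vehicle_id : String) : List String × (List (String × List (String × List String))) :=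
  let n := request_id_on_order.length
  pvOuterA (pvFac requests_items_map ongoing_items_map) requests_items_map request_id_on_order n vehicle_id n 1000 0 0

-- ===== PORT B =====
-- runs[-1] = runs[-1] + items
def pvUpdLast (l : List (List String)) (its : List String) : List (List String) :=
  match l with
  | [] => []
  | [a] => [a ++ its]
  | a :: b :: rest => a :: pvUpdLast (b :: rest) its

-- one step of B's grouping pass (state: runs so far, current factory id)
def pvStepB (f : String → String) (requests_items_map : List (String × List (String × List String)))
    (st : List (List String) × Option String) (rid : String) : List (List String) × Option String :=
  let items := pvDel requests_items_map rid
  let fac := f rid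
  if st.1 ≠ [] ∧ st.2 = some fac then (pvUpdLast st.1 items, st.2)
  else (st.1 ++ [items], some fac)

-- B's emit loop: number the runs from nid = 1000 upward
def pvEmitB (vehicle_id : String) : Int → List (List String) → List String × List (String × List (String × List String))
  | _, [] => ([], [])
  | nid, run :: rest =>
    let key := PySem.Int.toStr nid ++ vehicle_id
    let r := pvEmitB vehicle_id (nid + 1) rest
    (key :: r.1, (key, [("delivery_only", run)]) :: r.2)

def ongoing_request_cluster_alt (request_id_on_order : List String) (requests_items_map : List (String × List (String × List String))) (ongoing_items_map : List (String × List (String × String))) (vehicle_id : String) : List String × (List (String × List (String × List String))) :=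
  let runs := (request_id_on_order.foldl
    (pvStepB (pvFac requests_items_map ongoing_items_map) requests_items_map) ([], none)).1
  pvEmitB vehicle_id 1000 runs

-- ===== PRECONDITION & SPEC =====
-- the chain of lookups the Python performs for one request id, as an Option
def pvFacChain? (requests_items_map : List (String × List (String × List String)))
    (ongoing_items_map : List (String × List (String × String))) (rid : String) : Option String :=
  (List.lookup rid requests_items_map).bind fun d =>
  (List.lookup "delivery_only" d).bind fun items =>
  items.head?.bind fun it0 =>
  (List.lookup it0 ongoing_items_map).bind fun od =>
  List.lookup "delivery_factory_id" od

-- Pre_ excludes exactly the inputs where Python A raises KeyError/IndexError: some request id on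
-- the order is missing from requests_items_map, lacks a non-empty "delivery_only" list, or its
-- first item is missing from ongoing_items_map or lacks "delivery_factory_id" (B raises there too).
def Pre_ongoing_request_cluster (request_id_on_order : List String) (requests_items_map : List (String × List (String × List String))) (ongoing_items_map : List (String × List (String × String))) (vehicle_id : String) : Prop :=
  ∀ rid ∈ request_id_on_order, (pvFacChain? requests_items_map ongoing_items_map rid).isSome = true
instance (request_id_on_order : List String) (requests_items_map : List (String × List (String × List String))) (ongoing_items_map : List (String × List (String × String))) (vehicle_id : String) : Decidable (Pre_ongoing_request_cluster request_id_on_order requests_items_map ongoing_items_map vehicle_id) := by unfold Pre_ongoing_request_cluster; infer_instance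

def pvWitness_ongoing_request_cluster : List String × (List (String × List (String × List String))) × (List (String × List (String × String))) × String :=
  (["r1", "r2"],
   [("r1", [("delivery_only", ["i1"])]), ("r2", [("delivery_only", ["i2"])])],
   [("i1", [("delivery_factory_id", "F")]), ("i2", [("delivery_factory_id", "F")])],
   "V")

def Spec_ongoing_request_cluster (request_id_on_order : List String) (requests_items_map : List (String × List (String × List String))) (ongoing_items_map : List (String × List (String × String))) (vehicle_id : String) (out : List String × (List (String × List (String × List String)))) : Prop := out = ongoing_request_cluster_alt request_id_on_order requests_items_map ongoing_items_map vehicle_id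
instance (request_id_on_order : List String) (requests_items_map : List (String × List (String × List String))) (ongoing_items_map : List (String × List (String × String))) (vehicle_id : String) (out : List String × (List (String × List (String × List String)))) : Decidable (Spec_ongoing_request_cluster request_id_on_order requests_items_map ongoing_items_map vehicle_id out) := by unfold Spec_ongoing_request_cluster; infer_instance

-- ===== CLAIM (what is proved, stated in full; the proofs are below) =====
def Claim_equal_ongoing_request_cluster : Prop := ∀ (request_id_on_order : List String) (requests_items_map : List (String × List (String × List String))) (ongoing_items_map : List (String × List (String × String))) (vehicle_id : String), Dom_ongoing_request_cluster request_id_on_order requests_items_map ongoing_items_map vehicle_id → Pre_ongoing_request_cluster request_id_on_order requests_items_map ongoing_items_map vehicle_id → Spec_ongoing_request_cluster request_id_on_order requests_items_map ongoing_items_map vehicle_id (ongoing_request_cluster request_id_on_order requests_items_map ongoing_items_map vehicle_id)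

-- ===== LEMMAS AND PROOFS =====

-- reference: maximal runs of consecutive requests with equal factory id
def pvChunks (f : String → String) : List String → List (List String)
  | [] => []
  | x :: xs =>
    (x :: xs.takeWhile (fun y => f y == f x)) :: pvChunks f (xs.dropWhile (fun y => f y == f x))
termination_by l => l.length
decreasing_by
  have := List.length_dropWhile_le (fun y => f y == f x) xs
  simp; omega

theorem pvChunks_nil (f : String → String) : pvChunks f [] = [] := by
  rw [pvChunks.eq_def]

theorem pvChunks_cons (f : String → String) (x : String) (xs : List String) :
    pvChunks f (x :: xs) =
      (x :: xs.takeWhile (fun y => f y == f x)) ::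
        pvChunks f (xs.dropWhile (fun y => f y == f x)) := by
  rw [pvChunks.eq_def]

def pvRunsOf (f : String → String) (rim : List (String × List (String × List String)))
    (l : List String) : List (List String) :=
  (pvChunks f l).map (fun c => c.flatMap (pvDel rim))

theorem pvUpdLast_nil (l : List (List String)) : pvUpdLast l [] = l := by
  induction l with
  | nil => rfl
  | cons a t ih =>
    cases t with
    | nil => simp [pvUpdLast]
    | cons b r => simpa [pvUpdLast] using ih

theorem pvUpdLast_append (rs : List (List String)) (a b : List String) :
    pvUpdLast (rs ++ [a]) b = rs ++ [a ++ b] := by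
  induction rs with
  | nil => rfl
  | cons x t ih =>
    cases t with
    | nil => simp [pvUpdLast]
    | cons y r => simpa [pvUpdLast] using ih

theorem pvUpdLast_ne_nil (rs : List (List String)) (b : List String) (h : rs ≠ []) :
    pvUpdLast rs b ≠ [] := by
  cases rs with
  | nil => exact absurd rfl h
  | cons x t => cases t <;> simp [pvUpdLast]

theorem pvUpdLast_updLast (rs : List (List String)) (a b : List String) :
    pvUpdLast (pvUpdLast rs a) b = pvUpdLast rs (a ++ b) := by
  induction rs with
  | nil => rfl
  | cons x t ih =>
    cases t with
    | nil => simp [pvUpdLast]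
    | cons y r =>
      have h1 : pvUpdLast (y :: r) a ≠ [] := pvUpdLast_ne_nil _ _ (by simp)
      rcases heq : pvUpdLast (y :: r) a with _ | ⟨z, w⟩
      · exact absurd heq h1
      · have e1 : pvUpdLast (x :: y :: r) a = x :: pvUpdLast (y :: r) a := rfl
        have e2 : pvUpdLast (x :: z :: w) b = x :: pvUpdLast (z :: w) b := rfl
        have e3 : pvUpdLast (x :: y :: r) (a ++ b) = x :: pvUpdLast (y :: r) (a ++ b) := rfl
        rw [e1, heq, e2, ← heq, ih, e3]

theorem pvFoldB_main (f : String → String) (rim : List (String × List (String × List String)))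
    (l : List String) : ∀ (rs : List (List String)) (c : String), rs ≠ [] →
    ∃ c', l.foldl (pvStepB f rim) (rs, some c) =
      (pvUpdLast rs ((l.takeWhile (fun y => f y == c)).flatMap (pvDel rim)) ++
        pvRunsOf f rim (l.dropWhile (fun y => f y == c)), c') := by
  induction l with
  | nil =>
    intro rs c _
    exact ⟨c, by simp [pvRunsOf, pvChunks_nil, pvUpdLast_nil]⟩
  | cons x xs ih =>
    intro rs c hrs
    by_cases hfx : f x = c
    · have step : pvStepB f rim (rs, some c) x = (pvUpdLast rs (pvDel rim x), some c) := by
        simp [pvStepB, hrs, hfx]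
      rw [List.foldl_cons, step]
      obtain ⟨c', hc'⟩ := ih (pvUpdLast rs (pvDel rim x)) c (pvUpdLast_ne_nil _ _ hrs)
      refine ⟨c', ?_⟩
      rw [hc', pvUpdLast_updLast]
      simp [List.takeWhile_cons, List.dropWhile_cons, hfx]
    · have hne : ¬ (rs ≠ [] ∧ (some c : Option String) = some (f x)) := by
        rintro ⟨-, h⟩
        exact hfx (Option.some_injective _ h).symm
      have step : pvStepB f rim (rs, some c) x = (rs ++ [pvDel rim x], some (f x)) := by
        simp only [pvStepB, if_neg hne]
      rw [List.foldl_cons, step]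
      obtain ⟨c', hc'⟩ := ih (rs ++ [pvDel rim x]) (f x) (by simp)
      refine ⟨c', ?_⟩
      rw [hc', pvUpdLast_append]
      have htw : (x :: xs).takeWhile (fun y => f y == c) = [] := by
        simp [List.takeWhile_cons, hfx]
      have hdw : (x :: xs).dropWhile (fun y => f y == c) = x :: xs := by
        simp [List.dropWhile_cons, hfx]
      rw [htw, hdw]
      simp only [pvRunsOf, pvChunks_cons, List.map_cons, List.flatMap_cons, List.flatMap_nil,
        pvUpdLast_nil]
      simp [List.append_assoc]

theorem pvFoldB_top (f : String → String) (rim : List (String × List (String × List String)))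
    (l : List String) : (l.foldl (pvStepB f rim) ([], none)).1 = pvRunsOf f rim l := by
  cases l with
  | nil => simp [pvRunsOf, pvChunks_nil]
  | cons x xs =>
    have step : pvStepB f rim (([], none) :
        List (List String) × Option String) x = ([pvDel rim x], some (f x)) := by
      simp [pvStepB]
    rw [List.foldl_cons, step]
    obtain ⟨c', hc'⟩ := pvFoldB_main f rim xs [pvDel rim x] (f x) (by simp)
    rw [hc']
    rw [show pvUpdLast [pvDel rim x]
      ((xs.takeWhile (fun y => f y == f x)).flatMap (pvDel rim)) =
      [pvDel rim x ++ (xs.takeWhile (fun y => f y == f x)).flatMap (pvDel rim)] from rfl]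
    simp only [pvRunsOf, pvChunks_cons, List.map_cons, List.flatMap_cons]
    simp

theorem pvFindRk_eq (f : String → String) (ids : List String) (left : Nat) : ∀ rk : Nat,
    pvFindRk f ids ids.length left rk =
      rk + ((ids.drop (rk + 1)).takeWhile (fun y => f y == f (pvGet ids left))).length := by
  intro rk
  fun_induction pvFindRk f ids ids.length left rk with
  | case1 rk h ih =>
    obtain ⟨h1, h2⟩ := h
    have hd : ids.drop (rk + 1) = ids[rk + 1] :: ids.drop (rk + 1 + 1) :=
      List.drop_eq_getElem_cons h1
    have hget : pvGet ids (rk + 1) = ids[rk + 1] := by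
      simp [pvGet, List.getD_eq_getElem?_getD, List.getElem?_eq_getElem h1]
    rw [ih, hd, List.takeWhile_cons]
    rw [hget] at h2
    simp only [h2, beq_self_eq_true, if_true, List.length_cons]
    omega
  | case2 rk h =>
    rw [Decidable.not_and_iff_or_not] at h
    rcases h with h | h
    · rw [List.drop_eq_nil_of_le (by omega)]
      simp
    · by_cases h1 : rk + 1 < ids.length
      · have hd : ids.drop (rk + 1) = ids[rk + 1] :: ids.drop (rk + 1 + 1) :=
          List.drop_eq_getElem_cons h1
        have hget : pvGet ids (rk + 1) = ids[rk + 1] := by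
          simp [pvGet, List.getD_eq_getElem?_getD, List.getElem?_eq_getElem h1]
        rw [hd, List.takeWhile_cons]
        rw [hget] at h
        simp [h]
      · rw [List.drop_eq_nil_of_le (by omega)]
        simp

theorem pvTake_len_takeWhile {α : Type} (p : α → Bool) (l : List α) :
    l.take (l.takeWhile p).length = l.takeWhile p := by
  induction l with
  | nil => rfl
  | cons x t ih =>
    by_cases hx : p x = true
    · simp [List.takeWhile_cons, hx, ih]
    · simp [List.takeWhile_cons, hx]

theorem pvDrop_len_takeWhile {α : Type} (p : α → Bool) (l : List α) :
    l.drop (l.takeWhile p).length = l.dropWhile p := by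
  induction l with
  | nil => rfl
  | cons x t ih =>
    by_cases hx : p x = true
    · simp [List.takeWhile_cons, List.dropWhile_cons, hx, ih]
    · simp [List.takeWhile_cons, List.dropWhile_cons, hx]

theorem pvLen_takeWhile_le {α : Type} (p : α → Bool) (l : List α) :
    (l.takeWhile p).length ≤ l.length := by
  induction l with
  | nil => simp
  | cons x t ih =>
    by_cases hx : p x = true
    · simp [List.takeWhile_cons, hx]; omega
    · simp [List.takeWhile_cons, hx]

theorem pvRangeFlat (rim : List (String × List (String × List String))) (ids : List String) :
    ∀ (m left : Nat), left + m ≤ ids.length →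
    (PySem.List.pyRange (left : Int) ((left + m : Nat) : Int) 1).flatMap
        (fun i => pvDel rim (pvGet ids i.toNat)) =
      ((ids.drop left).take m).flatMap (pvDel rim) := by
  intro m
  induction m with
  | zero =>
    intro left h
    rw [PySem.List.pyRange_one_eq_nil (by simp)]
    simp
  | succ m ih =>
    intro left h
    have hlt : left < ids.length := by omega
    rw [PySem.List.pyRange_one_cons (by push_cast; omega), List.flatMap_cons]
    rw [show ((left : Int) + 1) = ((left + 1 : Nat) : Int) from by push_cast; ring]
    rw [show ((left + (m + 1) : Nat) : Int) = ((left + 1 + m : Nat) : Int) from by push_cast; ring]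
    rw [ih (left + 1) (by omega)]
    rw [List.drop_eq_getElem_cons hlt, List.take_succ_cons, List.flatMap_cons]
    have hget : pvGet ids ((left : Int).toNat) = ids[left] := by
      simp [pvGet, List.getD_eq_getElem?_getD, List.getElem?_eq_getElem hlt]
    rw [hget]

theorem pvCollect_eq (rim : List (String × List (String × List String))) (ids : List String)
    (m left : Nat) (h : left + m + 1 ≤ ids.length) :
    pvCollect rim ids left (left + m) =
      ((ids.drop left).take (m + 1)).flatMap (pvDel rim) := by
  rw [pvCollect, PySem.List.foldl_append_eq_flatMap, List.nil_append]
  rw [show (((left + m : Nat) : Int) + 1) = ((left + m + 1 : Nat) : Int) from by push_cast; ring]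
  rw [show left + m + 1 = left + (m + 1) from by omega] at h ⊢
  exact pvRangeFlat rim ids (m + 1) left h

theorem pvOuterA_eq (f : String → String) (rim : List (String × List (String × List String)))
    (ids : List String) (vid : String) : ∀ (fuel left : Nat) (id : Int),
    ids.length - left ≤ fuel → left ≤ ids.length →
    pvOuterA f rim ids ids.length vid fuel id left left =
      pvEmitB vid id (pvRunsOf f rim (ids.drop left)) := by
  intro fuel
  induction fuel with
  | zero =>
    intro left id h1 h2
    have hl : left = ids.length := by omega
    subst hl
    simp [pvOuterA, pvRunsOf, pvChunks_nil, pvEmitB, List.drop_length]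
  | succ fuel ih =>
    intro left id h1 h2
    by_cases hlt : left < ids.length
    · have hget : pvGet ids left = ids[left] := by
        simp [pvGet, List.getD_eq_getElem?_getD, List.getElem?_eq_getElem hlt]
      have hfind : pvFindRk f ids ids.length left left =
          left + ((ids.drop (left + 1)).takeWhile (fun y => f y == f ids[left])).length := by
        rw [pvFindRk_eq, hget]
      set t := ((ids.drop (left + 1)).takeWhile (fun y => f y == f ids[left])).length with htdef
      have htle : t ≤ ids.length - (left + 1) := by
        have h3 := pvLen_takeWhile_le (fun y => f y == f ids[left]) (ids.drop (left + 1))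
        rw [List.length_drop] at h3
        omega
      have hdrop : ids.drop left = ids[left] :: ids.drop (left + 1) :=
        List.drop_eq_getElem_cons hlt
      have htake : (ids.drop left).take (t + 1) =
          ids[left] :: (ids.drop (left + 1)).takeWhile (fun y => f y == f ids[left]) := by
        rw [hdrop, List.take_succ_cons, htdef, pvTake_len_takeWhile]
      have hrest : ids.drop (left + t + 1) =
          (ids.drop (left + 1)).dropWhile (fun y => f y == f ids[left]) := by
        calc ids.drop (left + t + 1) = (ids.drop (left + 1)).drop t := by
              rw [List.drop_drop]; congr 1; omega
          _ = (ids.drop (left + 1)).dropWhile (fun y => f y == f ids[left]) := by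
              rw [htdef, pvDrop_len_takeWhile]
      have hchunks : pvChunks f (ids.drop left) =
          ((ids.drop left).take (t + 1)) :: pvChunks f (ids.drop (left + t + 1)) := by
        rw [hdrop, pvChunks_cons, ← htake, hrest, hdrop]
      have hc := pvCollect_eq rim ids t left (by omega)
      simp only [pvOuterA, if_pos hlt]
      rw [hfind, hc]
      rw [pvRunsOf, hchunks, List.map_cons]
      rw [show pvEmitB vid id (((ids.drop left).take (t + 1)).flatMap (pvDel rim) ::
            (pvChunks f (ids.drop (left + t + 1))).map (fun c => c.flatMap (pvDel rim))) =
          ((PySem.Int.toStr id ++ vid) :: (pvEmitB vid (id + 1)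
              ((pvChunks f (ids.drop (left + t + 1))).map (fun c => c.flatMap (pvDel rim)))).1,
            (PySem.Int.toStr id ++ vid,
              [("delivery_only", ((ids.drop left).take (t + 1)).flatMap (pvDel rim))]) ::
            (pvEmitB vid (id + 1)
              ((pvChunks f (ids.drop (left + t + 1))).map (fun c => c.flatMap (pvDel rim)))).2)
          from rfl]
      rw [← pvRunsOf, ih (left + t + 1) (id + 1) (by omega) (by omega)]
    · have hl : left = ids.length := by omega
      subst hl
      simp [pvOuterA, pvRunsOf, pvChunks_nil, pvEmitB, List.drop_length]

-- ===== VERDICT (by name: the statement is the Claim_ definition above) =====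
theorem ongoing_request_cluster_spec : Claim_equal_ongoing_request_cluster := by
  intro ids rim oim vid _dom _pre
  unfold Spec_ongoing_request_cluster ongoing_request_cluster ongoing_request_cluster_alt
  rw [pvFoldB_top, pvOuterA_eq _ _ _ _ ids.length 0 1000 (by omega) (by omega), List.drop_zero]
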